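-- pv_equiv track=rewrite | github.com/marcusjoshm/percell4 | src/percell4/io/assembler.py | _tile_positions
-- ===== SOURCE A (Python) =====
-- def _tile_positions(
--     rows: int, cols: int, grid_type: str, order: str
-- ) -> dict[int, tuple[int, int]]:
--     """Map tile index to (row, col) grid position.
--
--     Parameters
--     ----------
--     grid_type : scanning pattern
--         'row_by_row', 'column_by_column', 'snake_by_row', 'snake_by_column'
--     order : starting corner and initial direction
--         'right_down' — start top-left, scan right then down (default)
--         'right_up'   — start bottom-left, scan right then up
--         'left_down'  — start top-right, scan left then down
--         'left_up'    — start bottom-right, scan left then up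
--     """
--     # Determine starting corner
--     start_bottom = "up" in order
--     start_right = "left" in order
--
--     # Build row and column sequences based on starting corner
--     if start_bottom:
--         row_seq = list(range(rows - 1, -1, -1))  # bottom to top
--     else:
--         row_seq = list(range(rows))  # top to bottom
--
--     if start_right:
--         col_seq = list(range(cols - 1, -1, -1))  # right to left
--     else:
--         col_seq = list(range(cols))  # left to right
--
--     positions: dict[int, tuple[int, int]] = {}
--     idx = 0
--
--     if grid_type == "row_by_row":
--         for r in row_seq:
--             for c in col_seq:
--                 positions[idx] = (r, c)
--                 idx += 1
--     elif grid_type == "column_by_column":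
--         for c in col_seq:
--             for r in row_seq:
--                 positions[idx] = (r, c)
--                 idx += 1
--     elif grid_type == "snake_by_row":
--         for i, r in enumerate(row_seq):
--             cs = col_seq if i % 2 == 0 else col_seq[::-1]
--             for c in cs:
--                 positions[idx] = (r, c)
--                 idx += 1
--     elif grid_type == "snake_by_column":
--         for i, c in enumerate(col_seq):
--             rs = row_seq if i % 2 == 0 else row_seq[::-1]
--             for r in rs:
--                 positions[idx] = (r, c)
--                 idx += 1
--     else:
--         raise ValueError(f"Unknown grid_type: {grid_type!r}")
--
--     return positions
-- ===== SOURCE B (Python) =====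
-- def _tile_positions(
--     rows: int, cols: int, grid_type: str, order: str
-- ) -> dict[int, tuple[int, int]]:
--     """Map tile index to (row, col): validate grid_type up front, then one flat
--     loop computing each position in closed form with divmod."""
--     if grid_type not in ("row_by_row", "column_by_column", "snake_by_row", "snake_by_column"):
--         raise ValueError(f"Unknown grid_type: {grid_type!r}")
--
--     row_seq = list(range(rows - 1, -1, -1)) if "up" in order else list(range(rows))
--     col_seq = list(range(cols - 1, -1, -1)) if "left" in order else list(range(cols))
--     nr, nc = len(row_seq), len(col_seq)
--
--     positions: dict[int, tuple[int, int]] = {}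
--     if grid_type in ("row_by_row", "snake_by_row"):
--         snake = grid_type == "snake_by_row"
--         for idx in range(nr * nc):
--             q, j = divmod(idx, nc)
--             if snake and q % 2 == 1:
--                 j = nc - 1 - j
--             positions[idx] = (row_seq[q], col_seq[j])
--     else:
--         snake = grid_type == "snake_by_column"
--         for idx in range(nr * nc):
--             q, j = divmod(idx, nr)
--             if snake and q % 2 == 1:
--                 j = nr - 1 - j
--             positions[idx] = (row_seq[j], col_seq[q])
--     return positions
-- ===== Notes on version B (the rewrite author's own statement) =====
-- stated objective: alternative
-- what changed: Replaces the four sequential nested-loop accumulators with upfront grid_type validation and a single flat loop over range(nr*nc) that derives each (row, col) arithmetically via divmod, reversing the inner index on odd outer indices for the snake patterns.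
import Mathlib
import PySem

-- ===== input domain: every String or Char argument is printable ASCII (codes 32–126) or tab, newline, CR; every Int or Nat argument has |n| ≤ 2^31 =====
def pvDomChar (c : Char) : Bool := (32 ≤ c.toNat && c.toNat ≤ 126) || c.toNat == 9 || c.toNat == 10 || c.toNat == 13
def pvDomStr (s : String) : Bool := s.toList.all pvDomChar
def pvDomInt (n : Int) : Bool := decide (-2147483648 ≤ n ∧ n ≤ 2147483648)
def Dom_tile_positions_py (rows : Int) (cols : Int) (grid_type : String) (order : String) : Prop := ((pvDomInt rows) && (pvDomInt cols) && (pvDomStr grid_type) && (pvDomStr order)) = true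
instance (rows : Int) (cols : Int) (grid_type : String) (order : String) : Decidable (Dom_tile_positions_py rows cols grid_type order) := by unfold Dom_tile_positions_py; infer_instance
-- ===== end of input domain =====

-- B changes the decomposition only (validate grid_type up front, then one flat divmod loop
-- instead of four nested-loop accumulators); same asymptotic cost, return value identical.

-- ===== PORT A =====
-- Literal transliteration of A. The dict of positions (int keys, in insertion order)
-- is a PySem.Dict; the returned dict is its .items association list.
-- col_seq[::-1] is PySem.List.slice? … (-1); the step is -1 ≠ 0 so .getD [] is exact.
def tile_positions_py (rows : Int) (cols : Int) (grid_type : String) (order : String) : List (Int × Int × Int) :=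
  let start_bottom := PySem.Str.isIn "up" order
  let start_right := PySem.Str.isIn "left" order
  let row_seq := if start_bottom then PySem.List.pyRange (rows - 1) (-1) (-1) else PySem.List.pyRange 0 rows 1
  let col_seq := if start_right then PySem.List.pyRange (cols - 1) (-1) (-1) else PySem.List.pyRange 0 cols 1
  let st0 : PySem.Dict Int (Int × Int) × Int := (PySem.Dict.empty, 0)
  if grid_type == "row_by_row" then
    (row_seq.foldl (fun st r =>
      col_seq.foldl (fun st c => (st.1.insert st.2 (r, c), st.2 + 1)) st) st0).1.items
  else if grid_type == "column_by_column" then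
    (col_seq.foldl (fun st c =>
      row_seq.foldl (fun st r => (st.1.insert st.2 (r, c), st.2 + 1)) st) st0).1.items
  else if grid_type == "snake_by_row" then
    ((PySem.List.enumerate row_seq 0).foldl (fun st p =>
      let cs := if PySem.Int.mod p.1 2 == 0 then col_seq else (PySem.List.slice? col_seq none none (-1)).getD []
      cs.foldl (fun st c => (st.1.insert st.2 (p.2, c), st.2 + 1)) st) st0).1.items
  else if grid_type == "snake_by_column" then
    ((PySem.List.enumerate col_seq 0).foldl (fun st p =>
      let rs := if PySem.Int.mod p.1 2 == 0 then row_seq else (PySem.List.slice? row_seq none none (-1)).getD []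
      rs.foldl (fun st r => (st.1.insert st.2 (r, p.2), st.2 + 1)) st) st0).1.items
  else
    []  -- raise ValueError: excluded by Pre_tile_positions_py

-- ===== PORT B =====
-- Literal transliteration of Source B: validate grid_type, then one flat loop over
-- range(nr*nc) building the dict; the position is computed with divmod.
def tile_positions_py_alt (rows : Int) (cols : Int) (grid_type : String) (order : String) : List (Int × Int × Int) :=
  if !(grid_type == "row_by_row" || grid_type == "column_by_column" ||
       grid_type == "snake_by_row" || grid_type == "snake_by_column") then
    []  -- raise ValueError: excluded by Pre_tile_positions_py
  else
    let row_seq := if PySem.Str.isIn "up" order then PySem.List.pyRange (rows - 1) (-1) (-1) else PySem.List.pyRange 0 rows 1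
    let col_seq := if PySem.Str.isIn "left" order then PySem.List.pyRange (cols - 1) (-1) (-1) else PySem.List.pyRange 0 cols 1
    let nr : Int := (row_seq.length : Int)
    let nc : Int := (col_seq.length : Int)
    if grid_type == "row_by_row" || grid_type == "snake_by_row" then
      let snake := grid_type == "snake_by_row"
      ((PySem.List.pyRange 0 (nr * nc) 1).foldl (fun d idx =>
        let q := PySem.Int.floordiv idx nc
        let j0 := PySem.Int.mod idx nc
        let j := if snake && (PySem.Int.mod q 2 == 1) then nc - 1 - j0 else j0
        d.insert idx (PySem.List.pyGetD row_seq q 0, PySem.List.pyGetD col_seq j 0))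
        (PySem.Dict.empty : PySem.Dict Int (Int × Int))).items
    else
      let snake := grid_type == "snake_by_column"
      ((PySem.List.pyRange 0 (nr * nc) 1).foldl (fun d idx =>
        let q := PySem.Int.floordiv idx nr
        let j0 := PySem.Int.mod idx nr
        let j := if snake && (PySem.Int.mod q 2 == 1) then nr - 1 - j0 else j0
        d.insert idx (PySem.List.pyGetD row_seq j 0, PySem.List.pyGetD col_seq q 0))
        (PySem.Dict.empty : PySem.Dict Int (Int × Int))).items

-- ===== PRECONDITION & SPEC =====
-- Pre_ excludes exactly the inputs on which A raises ValueError (unknown grid_type).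
def Pre_tile_positions_py (rows : Int) (cols : Int) (grid_type : String) (order : String) : Prop :=
  grid_type = "row_by_row" ∨ grid_type = "column_by_column" ∨
  grid_type = "snake_by_row" ∨ grid_type = "snake_by_column"
instance (rows : Int) (cols : Int) (grid_type : String) (order : String) : Decidable (Pre_tile_positions_py rows cols grid_type order) := by unfold Pre_tile_positions_py; infer_instance
def pvWitness_tile_positions_py : Int × Int × String × String := (2, 3, "snake_by_row", "left_up")

def Spec_tile_positions_py (rows : Int) (cols : Int) (grid_type : String) (order : String) (out : List (Int × Int × Int)) : Prop := out = tile_positions_py_alt rows cols grid_type order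
instance (rows : Int) (cols : Int) (grid_type : String) (order : String) (out : List (Int × Int × Int)) : Decidable (Spec_tile_positions_py rows cols grid_type order out) := by unfold Spec_tile_positions_py; infer_instance

-- ===== CLAIM (what is proved, stated in full; the proofs are below) =====
def Claim_equal_tile_positions_py : Prop := ∀ (rows : Int) (cols : Int) (grid_type : String) (order : String), Dom_tile_positions_py rows cols grid_type order → Pre_tile_positions_py rows cols grid_type order → Spec_tile_positions_py rows cols grid_type order (tile_positions_py rows cols grid_type order)

-- ===== LEMMAS AND PROOFS =====

-- A's dict-building fold with a strictly increasing fresh counter appends items.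
theorem pvDictFold (ps : List (Int × Int)) (d : PySem.Dict Int (Int × Int)) (n : Int)
    (h : ∀ k ∈ d.keys, k < n) :
    (ps.foldl (fun st v => (st.1.insert st.2 v, st.2 + 1)) (d, n)).1.items
      = d.items ++ PySem.List.enumerate ps n := by
  induction ps generalizing d n with
  | nil => simp [PySem.List.enumerate_nil]
  | cons v ps ih =>
    have hc : d.contains n = false := by
      cases hb : d.contains n with
      | false => rfl
      | true =>
        exact absurd (h n ((PySem.Dict.contains_iff_mem_keys d n).mp hb)) (lt_irrefl n)
    have hkeys : ∀ k ∈ (d.insert n v).keys, k < n + 1 := by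
      intro k hk
      rw [PySem.Dict.keys_insert_of_not_contains d hc (v := v)] at hk
      rcases List.mem_append.mp hk with h1 | h1
      · exact lt_trans (h k h1) (by omega)
      · simp at h1; omega
    simp only [List.foldl_cons]
    rw [ih (d.insert n v) (n + 1) hkeys,
        PySem.Dict.items_insert_of_not_contains d hc (v := v),
        PySem.List.enumerate_cons, List.append_assoc, List.singleton_append]

-- indexing a flatten of equal-length blocks
theorem pvFlattenLen {γ : Type} (bs : List (List γ)) (m : Nat) (h : ∀ b ∈ bs, b.length = m) :
    bs.flatten.length = bs.length * m := by
  induction bs with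
  | nil => simp
  | cons b bs ih =>
    have hb : b.length = m := h b (List.mem_cons_self ..)
    have := ih (fun b hb => h b (List.mem_cons_of_mem _ hb))
    simp only [List.flatten_cons, List.length_append, List.length_cons, this, hb]
    ring

theorem pvFlattenGet {γ : Type} (bs : List (List γ)) (m : Nat) (h : ∀ b ∈ bs, b.length = m)
    (k : Nat) (hk : k < bs.length * m) :
    bs.flatten[k]? = bs[k / m]?.bind (fun b => b[k % m]?) := by
  induction bs generalizing k with
  | nil => simp at hk
  | cons b bs ih =>
    have hb : b.length = m := h b (List.mem_cons_self ..)
    have hk' : k < bs.length * m + m := by simp only [List.length_cons, Nat.add_mul, Nat.one_mul] at hk; omega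
    have hm : 0 < m := by
      rcases Nat.eq_zero_or_pos m with h0 | h0
      · subst h0; simp at hk
      · exact h0
    simp only [List.flatten_cons]
    by_cases hlt : k < m
    · rw [List.getElem?_append_left (by rw [hb]; omega), Nat.div_eq_of_lt hlt, Nat.mod_eq_of_lt hlt]
      simp
    · obtain ⟨t, rfl⟩ : ∃ t, k = m + t := ⟨k - m, by omega⟩
      rw [List.getElem?_append_right (by rw [hb]; omega), hb, Nat.add_sub_cancel_left,
          Nat.add_comm m t, Nat.add_div_right _ (by omega), Nat.add_mod_right,
          List.getElem?_cons_succ]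
      exact ih (fun b hb => h b (List.mem_cons_of_mem _ hb)) t (by simp only [List.length_cons, Nat.add_mul, Nat.one_mul] at hk; omega)

-- the abstract blocks of A's (snake-)row scan, parameterised by payload
def pvBlocks (xs ys : List Int) (snake : Bool) (pair : Int → Int → Int × Int) : List (List (Int × Int)) :=
  (PySem.List.enumerate xs 0).map (fun p =>
    (if snake && (PySem.Int.mod p.1 2 == 1) then ys.reverse else ys).map (fun c => pair p.2 c))

-- core: enumerating the flattened blocks equals B's flat divmod loop (as a map)
theorem pvCore (xs ys : List Int) (snake : Bool) (pair : Int → Int → Int × Int) :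
    PySem.List.enumerate ((pvBlocks xs ys snake pair).flatten) 0
      = (PySem.List.pyRange 0 ((xs.length : Int) * (ys.length : Int)) 1).map
          (fun idx =>
            let q := PySem.Int.floordiv idx (ys.length : Int)
            let j0 := PySem.Int.mod idx (ys.length : Int)
            let j := if snake && (PySem.Int.mod q 2 == 1) then (ys.length : Int) - 1 - j0 else j0
            (idx, pair (PySem.List.pyGetD xs q 0) (PySem.List.pyGetD ys j 0))) := by
  have hblen : ∀ b ∈ pvBlocks xs ys snake pair, b.length = ys.length := by
    intro b hb
    simp only [pvBlocks, List.mem_map] at hb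
    obtain ⟨p, _, rfl⟩ := hb
    rw [List.length_map]
    split <;> simp
  have hbsl : (pvBlocks xs ys snake pair).length = xs.length := by
    simp [pvBlocks, PySem.List.length_enumerate]
  have hL : (pvBlocks xs ys snake pair).flatten.length = xs.length * ys.length := by
    rw [pvFlattenLen _ ys.length hblen, hbsl]
  rw [PySem.List.enumerate_eq_map_pyRange ((pvBlocks xs ys snake pair).flatten) ((0, 0) : Int × Int)]
  have hcast : (((pvBlocks xs ys snake pair).flatten.length : Int)) = (xs.length : Int) * (ys.length : Int) := by
    rw [hL]; push_cast; ring
  rw [PySem.List.len_eq, hcast]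
  apply List.map_congr_left
  intro idx hidx
  rw [PySem.List.mem_pyRange_one] at hidx
  obtain ⟨h0, hlt⟩ := hidx
  obtain ⟨k, rfl⟩ : ∃ kk : ℕ, idx = (kk : Int) := ⟨idx.toNat, (Int.toNat_of_nonneg h0).symm⟩
  have hk : k < xs.length * ys.length := by exact_mod_cast hlt
  have hm : 0 < ys.length := Nat.pos_of_ne_zero (fun h0 => by simp [h0] at hk)
  have hq : k / ys.length < xs.length := (Nat.div_lt_iff_lt_mul hm).mpr hk
  have hjm : k % ys.length < ys.length := Nat.mod_lt _ hm
  have hbq : (pvBlocks xs ys snake pair)[k / ys.length]?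
      = some ((if snake && (PySem.Int.mod ((k / ys.length : Nat) : Int) 2 == 1) then ys.reverse else ys).map
          (fun c => pair (xs[k / ys.length]'hq) c)) := by
    simp only [pvBlocks, List.getElem?_map, PySem.List.getElem?_enumerate,
      List.getElem?_eq_getElem hq]
    simp
  have hmod2 : PySem.Int.mod ((k / ys.length : Nat) : Int) 2 = (((k / ys.length) % 2 : Nat) : Int) := by
    exact_mod_cast PySem.Int.mod_natCast (k / ys.length) 2
  have hfd : PySem.Int.floordiv ((k : Nat) : Int) ((ys.length : Nat) : Int) = (((k / ys.length : Nat)) : Int) :=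
    PySem.Int.floordiv_natCast k ys.length
  have hmd : PySem.Int.mod ((k : Nat) : Int) ((ys.length : Nat) : Int) = (((k % ys.length : Nat)) : Int) :=
    PySem.Int.mod_natCast k ys.length
  simp only [PySem.List.pyGetD_natCast, List.getD_eq_getElem?_getD,
    pvFlattenGet _ ys.length hblen k (by rw [hbsl]; exact hk), hbq, Option.bind_some, hfd, hmd, hmod2]
  rcases Nat.mod_two_eq_zero_or_one (k / ys.length) with hp | hp <;> rw [hp] <;> cases snake <;>
    simp only [Bool.false_and, Bool.true_and, Nat.cast_zero, Nat.cast_one,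
      Bool.false_eq_true, if_false, if_true,
      show ((0 : Int) == 1) = false from by decide,
      show ((1 : Int) == 1) = true from by decide,
      List.getElem?_map]
  all_goals
    have hpg : PySem.List.pyGetD ys ((k : Int) % (ys.length : Int)) 0 = ys[k % ys.length]'hjm := by
      rw [show ((k : Int) % (ys.length : Int)) = ((k % ys.length : Nat) : Int) from by push_cast; ring,
        PySem.List.pyGetD_natCast, List.getD_eq_getElem?_getD, List.getElem?_eq_getElem hjm,
        Option.getD_some]
  · simp [List.getElem?_eq_getElem hjm, List.getElem?_eq_getElem hq, hpg]
  · simp [List.getElem?_eq_getElem hjm, List.getElem?_eq_getElem hq, hpg]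
  · simp [List.getElem?_eq_getElem hjm, List.getElem?_eq_getElem hq, hpg]
  · have hrev : k % ys.length < ys.reverse.length := by simpa using hjm
    rw [show ((ys.length : Int) - 1 - ((k % ys.length : Nat) : Int)) = ((ys.length - 1 - k % ys.length : Nat) : Int) from by omega]
    simp [List.getElem?_eq_getElem hrev, List.getElem?_eq_getElem hq, List.getElem_reverse,
      List.getD_eq_getElem?_getD,
      List.getElem?_eq_getElem (show ys.length - 1 - k % ys.length < ys.length from by omega)]

-- a nested fold over blocks is a flat fold over their flatten
theorem pvFoldlBlocks {α : Type} (L : List α) (B : α → List (Int × Int))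
    (g : PySem.Dict Int (Int × Int) × Int → Int × Int → PySem.Dict Int (Int × Int) × Int)
    (st : PySem.Dict Int (Int × Int) × Int) :
    L.foldl (fun st p => (B p).foldl g st) st = ((L.map B).flatten).foldl g st := by
  induction L generalizing st with
  | nil => rfl
  | cons x L ih => simp only [List.foldl_cons, List.map_cons, List.flatten_cons,
      List.foldl_append, ih]

-- B's flat dict-building loop over a range of fresh keys appends items
theorem pvDictFoldRange (f : Int → Int × Int) (a N : Int) (d : PySem.Dict Int (Int × Int))
    (h : ∀ k ∈ d.keys, k < a) :
    ((PySem.List.pyRange a N 1).foldl (fun d idx => d.insert idx (f idx)) d).items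
      = d.items ++ (PySem.List.pyRange a N 1).map (fun idx => (idx, f idx)) := by
  generalize hn : (N - a).toNat = n
  induction n generalizing a d with
  | zero =>
    rw [PySem.List.pyRange_one_eq_nil (by omega)]
    simp
  | succ n ih =>
    have haN : a < N := by omega
    rw [PySem.List.pyRange_one_cons haN]
    simp only [List.foldl_cons, List.map_cons]
    have hc : d.contains a = false := by
      cases hb : d.contains a with
      | false => rfl
      | true => exact absurd (h a ((PySem.Dict.contains_iff_mem_keys d a).mp hb)) (lt_irrefl a)
    have hkeys : ∀ k ∈ (d.insert a (f a)).keys, k < a + 1 := by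
      intro k hk
      rw [PySem.Dict.keys_insert_of_not_contains d hc (v := f a)] at hk
      rcases List.mem_append.mp hk with h1 | h1
      · exact lt_trans (h k h1) (by omega)
      · simp at h1; omega
    rw [ih (a + 1) (d.insert a (f a)) hkeys (by omega),
        PySem.Dict.items_insert_of_not_contains d hc (v := f a),
        List.append_assoc, List.singleton_append]

-- A's snake condition (scan forward when i % 2 == 0) as pvBlocks' condition
theorem pvCondFlip {γ : Type} (x : Int) (a b : γ) :
    (if PySem.Int.mod x 2 == 0 then a else b) = (if true && (PySem.Int.mod x 2 == 1) then b else a) := by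
  rcases PySem.Int.mod_two_eq x with h | h <;> rw [h] <;>
    simp only [show ((0 : Int) == 0) = true from by decide, show ((0 : Int) == 1) = false from by decide,
      show ((1 : Int) == 0) = false from by decide, show ((1 : Int) == 1) = true from by decide,
      Bool.true_and, if_true, if_false, Bool.false_eq_true]

-- pvBlocks without snaking forgets the enumeration
theorem pvBlocksFalse (xs ys : List Int) (pair : Int → Int → Int × Int) :
    pvBlocks xs ys false pair = xs.map (fun r => ys.map (fun c => pair r c)) := by
  simp only [pvBlocks, Bool.false_and, Bool.false_eq_true, if_false]
  rw [show (fun p : Int × Int => ys.map (fun c => pair p.2 c))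
        = ((fun r => ys.map (fun c => pair r c)) ∘ (fun p : Int × Int => p.2)) from rfl,
      ← List.map_map, PySem.List.map_snd_enumerate]

-- pvBlocks with snaking is A's enumerate-and-reverse-odd-blocks scan
theorem pvBlocksTrue (xs ys : List Int) (pair : Int → Int → Int × Int) :
    pvBlocks xs ys true pair
      = (PySem.List.enumerate xs 0).map (fun p =>
          (if PySem.Int.mod p.1 2 == 0 then ys else (PySem.List.slice? ys none none (-1)).getD []).map
            (fun c => pair p.2 c)) := by
  simp only [pvBlocks, PySem.List.slice?_none_none_neg_one, Option.getD_some]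
  apply List.map_congr_left
  intro p _
  rw [pvCondFlip p.1 ys ys.reverse]

-- A's nested emit loop equals the enumeration of the flattened pvBlocks
theorem pvASide (L : List (Int × Int)) :
    (L.foldl (fun st v => (st.1.insert st.2 v, st.2 + 1))
        ((PySem.Dict.empty : PySem.Dict Int (Int × Int)), (0 : Int))).1.items
      = PySem.List.enumerate L 0 := by
  rw [pvDictFold L PySem.Dict.empty 0 (by simp [PySem.Dict.keys_empty])]
  simp [show (PySem.Dict.empty : PySem.Dict Int (Int × Int)).items = [] from rfl]

-- A's plain nested loop, as the enumeration of the flattened (non-snake) blocks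
theorem pvANested (xs ys : List Int) (pair : Int → Int → Int × Int) :
    (xs.foldl (fun st r => ys.foldl (fun st c => (st.1.insert st.2 (pair r c), st.2 + 1)) st)
        ((PySem.Dict.empty : PySem.Dict Int (Int × Int)), (0 : Int))).1.items
      = PySem.List.enumerate ((pvBlocks xs ys false pair).flatten) 0 := by
  have hf : (fun (st : PySem.Dict Int (Int × Int) × Int) r =>
        ys.foldl (fun st c => (st.1.insert st.2 (pair r c), st.2 + 1)) st)
      = (fun st r => ((fun r => ys.map (fun c => pair r c)) r).foldl
          (fun st v => (st.1.insert st.2 v, st.2 + 1)) st) := by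
    funext st r; rw [List.foldl_map]
  rw [hf, pvFoldlBlocks, pvASide, ← pvBlocksFalse]

-- A's snake loop, as the enumeration of the flattened snake blocks
theorem pvASnake (xs ys : List Int) (pair : Int → Int → Int × Int) :
    ((PySem.List.enumerate xs 0).foldl (fun st p =>
        (if PySem.Int.mod p.1 2 == 0 then ys else (PySem.List.slice? ys none none (-1)).getD []).foldl
          (fun st c => (st.1.insert st.2 (pair p.2 c), st.2 + 1)) st)
        ((PySem.Dict.empty : PySem.Dict Int (Int × Int)), (0 : Int))).1.items
      = PySem.List.enumerate ((pvBlocks xs ys true pair).flatten) 0 := by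
  have hf : (fun (st : PySem.Dict Int (Int × Int) × Int) (p : Int × Int) =>
        (if PySem.Int.mod p.1 2 == 0 then ys else (PySem.List.slice? ys none none (-1)).getD []).foldl
          (fun st c => (st.1.insert st.2 (pair p.2 c), st.2 + 1)) st)
      = (fun st p => ((fun (p : Int × Int) =>
            (if PySem.Int.mod p.1 2 == 0 then ys else (PySem.List.slice? ys none none (-1)).getD []).map
              (fun c => pair p.2 c)) p).foldl
          (fun st v => (st.1.insert st.2 v, st.2 + 1)) st) := by
    funext st p; rw [List.foldl_map]
  rw [hf, pvFoldlBlocks, pvASide, ← pvBlocksTrue]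

-- ===== VERDICT (by name: the statement is the Claim_ definition above) =====
theorem tile_positions_py_spec : Claim_equal_tile_positions_py := by
  intro rows cols grid_type order _ hpre
  unfold Spec_tile_positions_py tile_positions_py tile_positions_py_alt
  rcases hpre with rfl | rfl | rfl | rfl
  · -- row_by_row
    simp only [show (("row_by_row" : String) == "row_by_row") = true from by decide,
      show (("row_by_row" : String) == "column_by_column") = false from by decide,
      show (("row_by_row" : String) == "snake_by_row") = false from by decide,
      show (("row_by_row" : String) == "snake_by_column") = false from by decide,
      Bool.true_or, Bool.false_or, Bool.or_true, Bool.or_false, Bool.not_true,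
      Bool.false_eq_true, if_true, if_false]
    refine (pvANested _ _ (fun r c => (r, c))).trans ?_
    refine (pvCore _ _ false (fun r c => (r, c))).trans ?_
    rw [pvDictFoldRange _ 0 _ PySem.Dict.empty (by simp [PySem.Dict.keys_empty]),
      show (PySem.Dict.empty : PySem.Dict Int (Int × Int)).items = [] from rfl,
      List.nil_append]
  · -- column_by_column
    simp only [show (("column_by_column" : String) == "row_by_row") = false from by decide,
      show (("column_by_column" : String) == "column_by_column") = true from by decide,
      show (("column_by_column" : String) == "snake_by_row") = false from by decide,
      show (("column_by_column" : String) == "snake_by_column") = false from by decide,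
      Bool.true_or, Bool.false_or, Bool.or_true, Bool.or_false, Bool.not_true,
      Bool.false_eq_true, if_true, if_false]
    refine (pvANested _ _ (fun c r => (r, c))).trans ?_
    refine (pvCore _ _ false (fun c r => (r, c))).trans ?_
    rw [pvDictFoldRange _ 0 _ PySem.Dict.empty (by simp [PySem.Dict.keys_empty]),
      show (PySem.Dict.empty : PySem.Dict Int (Int × Int)).items = [] from rfl,
      List.nil_append]
    conv_lhs => rw [Int.mul_comm]
  · -- snake_by_row
    simp only [show (("snake_by_row" : String) == "row_by_row") = false from by decide,
      show (("snake_by_row" : String) == "column_by_column") = false from by decide,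
      show (("snake_by_row" : String) == "snake_by_row") = true from by decide,
      show (("snake_by_row" : String) == "snake_by_column") = false from by decide,
      Bool.true_or, Bool.false_or, Bool.or_true, Bool.or_false, Bool.not_true,
      Bool.false_eq_true, if_true, if_false]
    refine (pvASnake _ _ (fun r c => (r, c))).trans ?_
    refine (pvCore _ _ true (fun r c => (r, c))).trans ?_
    rw [pvDictFoldRange _ 0 _ PySem.Dict.empty (by simp [PySem.Dict.keys_empty]),
      show (PySem.Dict.empty : PySem.Dict Int (Int × Int)).items = [] from rfl,
      List.nil_append]
  · -- snake_by_column
    simp only [show (("snake_by_column" : String) == "row_by_row") = false from by decide,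
      show (("snake_by_column" : String) == "column_by_column") = false from by decide,
      show (("snake_by_column" : String) == "snake_by_row") = false from by decide,
      show (("snake_by_column" : String) == "snake_by_column") = true from by decide,
      Bool.true_or, Bool.false_or, Bool.or_true, Bool.or_false, Bool.not_true,
      Bool.false_eq_true, if_true, if_false]
    refine (pvASnake _ _ (fun c r => (r, c))).trans ?_
    refine (pvCore _ _ true (fun c r => (r, c))).trans ?_
    rw [pvDictFoldRange _ 0 _ PySem.Dict.empty (by simp [PySem.Dict.keys_empty]),
      show (PySem.Dict.empty : PySem.Dict Int (Int × Int)).items = [] from rfl,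
      List.nil_append]
    conv_lhs => rw [Int.mul_comm]
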